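-- pv_equiv track=rewrite | github.com/VolemAzira/teslogika | Number_2.py | cari_kata
-- ===== SOURCE A (Python) =====
-- def cari_kata(teks):
--     kata_kunci = ["sang gajah", "serigala", "harimau"]
--     hasil = []
--
--     for kata in kata_kunci:
--         indeks = teks.find(kata)
--         while indeks != -1:
--             hasil.append(kata)
--             indeks = teks.find(kata, indeks + 1)
--
--     return " - ".join(hasil)
-- ===== SOURCE B (Python) =====
-- def cari_kata(teks):
--     kata_kunci = ["sang gajah", "serigala", "harimau"]
--     hasil = []
--     for kata in kata_kunci:
--         n = sum(1 for i in range(len(teks) - len(kata) + 1)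
--                 if teks[i:i + len(kata)] == kata)
--         hasil.extend([kata] * n)
--     return " - ".join(hasil)
-- ===== Notes on version B (the rewrite author's own statement) =====
-- stated objective: alternative
-- what changed: Replaced the find-advancing while loop per keyword by a two-phase decomposition: count overlapping occurrences by testing every start position with a slice comparison, then build the result by list repetition ([kata]*n).
import Mathlib
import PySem

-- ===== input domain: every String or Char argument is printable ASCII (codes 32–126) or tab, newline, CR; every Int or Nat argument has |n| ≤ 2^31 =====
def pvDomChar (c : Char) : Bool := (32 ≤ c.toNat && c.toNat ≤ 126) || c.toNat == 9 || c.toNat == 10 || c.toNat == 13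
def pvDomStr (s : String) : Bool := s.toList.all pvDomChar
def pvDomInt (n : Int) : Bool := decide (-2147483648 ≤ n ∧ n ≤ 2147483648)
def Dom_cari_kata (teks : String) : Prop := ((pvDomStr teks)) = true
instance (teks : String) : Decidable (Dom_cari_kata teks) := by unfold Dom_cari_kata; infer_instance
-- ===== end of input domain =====

-- B replaces A's find-advancing while loop by counting occurrence start positions and repeating the keyword (alternative decomposition, no speed claim).

-- ===== PORT A =====
-- the inner 'while indeks != -1' loop; fuel = teks.length + 1 bounds the iteration count (each step strictly increases indeks)
def pvLoopA (teks kata : String) : Nat → Int → List String → List String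
  | 0, _, hasil => hasil
  | fuel + 1, indeks, hasil =>
    if indeks ≠ -1 then
      pvLoopA teks kata fuel (PySem.Str.findFrom teks kata (indeks + 1) none) (hasil ++ [kata])
    else hasil

def cari_kata (teks : String) : String :=
  let kata_kunci := ["sang gajah", "serigala", "harimau"]
  let hasil := kata_kunci.foldl
    (fun hasil kata => pvLoopA teks kata (teks.length + 1) (PySem.Str.find teks kata) hasil) []
  PySem.Str.join " - " hasil

-- ===== PORT B =====
-- n = sum(1 for i in range(len(teks) - len(kata) + 1) if teks[i:i+len(kata)] == kata)
def pvKeyCount (teks kata : String) : Nat :=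
  (PySem.List.pyRange 0 ((teks.length : Int) - (kata.length : Int) + 1) 1).countP
    (fun i => PySem.Str.slice teks (some i) (some (i + (kata.length : Int))) == kata)

def cari_kata_alt (teks : String) : String :=
  let kata_kunci := ["sang gajah", "serigala", "harimau"]
  let hasil := kata_kunci.foldl
    (fun hasil kata => hasil ++ List.replicate (pvKeyCount teks kata) kata) []
  PySem.Str.join " - " hasil

-- ===== PRECONDITION & SPEC =====
def Spec_cari_kata (teks : String) (out : String) : Prop := out = cari_kata_alt teks
instance (teks : String) (out : String) : Decidable (Spec_cari_kata teks out) := by unfold Spec_cari_kata; infer_instance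

-- ===== CLAIM (what is proved, stated in full; the proofs are below) =====
def Claim_equal_cari_kata : Prop := ∀ (teks : String), Dom_cari_kata teks → Spec_cari_kata teks (cari_kata teks)

-- ===== LEMMAS AND PROOFS =====

-- number of occurrence start positions of p in cs at index ≥ k
def pvOcc (cs p : List Char) (k : Nat) : Nat :=
  (List.range' k (cs.length - k)).countP (fun i => decide (p <+: cs.drop i))

lemma pv_prefix_drop_infix {cs p : List Char} {k i : Nat} (hk : k ≤ i)
    (h : p <+: cs.drop i) : p <:+: cs.drop k := by
  have hd : cs.drop i = (cs.drop k).drop (i - k) := by rw [List.drop_drop]; congr 1; omega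
  exact (hd ▸ h).isInfix.trans (List.drop_suffix _ _).isInfix

lemma pv_countP_range_ext (q : Nat → Bool) (M N : Nat) (h : N ≤ M)
    (hq : ∀ i, N ≤ i → q i = false) :
    (List.range M).countP q = (List.range N).countP q := by
  have : M = N + (M - N) := by omega
  rw [this, List.range_add, List.countP_append]
  have h0 : ((List.range (M - N)).map (N + ·)).countP q = 0 := by
    apply List.countP_eq_zero.mpr
    intro i hi
    obtain ⟨j, _, rfl⟩ := List.mem_map.mp hi
    simp [hq _ (Nat.le_add_right _ _)]
  omega

lemma pvOcc_split (cs p : List Char) (k J : Nat) (hkJ : k ≤ J) (hJ : J < cs.length)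
    (hpref : p <+: cs.drop J) (hmin : ∀ i, k ≤ i → i < J → ¬ p <+: cs.drop i) :
    pvOcc cs p k = pvOcc cs p (J + 1) + 1 := by
  unfold pvOcc
  have hsplit : List.range' k (cs.length - k)
      = (List.range' k (J - k) ++ List.range' J 1) ++ List.range' (J + 1) (cs.length - (J + 1)) := by
    rw [show List.range' J 1 = List.range' (k + (J - k)) 1 by congr 1; omega,
        List.range'_append_1,
        show List.range' (J + 1) (cs.length - (J + 1))
            = List.range' (k + (J - k + 1)) (cs.length - (J + 1)) by congr 1; omega,
        List.range'_append_1]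
    congr 1
    omega
  rw [hsplit, List.countP_append, List.countP_append]
  have hz : (List.range' k (J - k)).countP (fun i => decide (p <+: cs.drop i)) = 0 := by
    apply List.countP_eq_zero.mpr
    intro i hi
    have := List.mem_range'_1.mp hi
    simpa using hmin i this.1 (by omega)
  have ho : (List.range' J 1).countP (fun i => decide (p <+: cs.drop i)) = 1 := by
    simp [hpref]
  omega

lemma pvLoopA_spec (teks kata : String) (hp : kata.toList ≠ []) :
    ∀ fuel (k : Nat) (hasil : List String), k ≤ teks.length →
      pvOcc teks.toList kata.toList k < fuel →
      pvLoopA teks kata fuel (PySem.Str.findFrom teks kata (k : Int) none) hasil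
        = hasil ++ List.replicate (pvOcc teks.toList kata.toList k) kata := by
  intro fuel
  induction fuel with
  | zero => intro k hasil _ h; exact absurd h (Nat.not_lt_zero _)
  | succ f ih =>
    intro k hasil hk hfuel
    have hLt : teks.toList.length = teks.length := teks.length_toList
    by_cases hj : PySem.Chars.findFrom teks.toList kata.toList (k : Int) none = -1
    · have hocc : pvOcc teks.toList kata.toList k = 0 := by
        unfold pvOcc
        apply List.countP_eq_zero.mpr
        intro i hi
        have hmem := List.mem_range'_1.mp hi
        simp only [decide_eq_true_eq]
        intro hpre
        exact (PySem.Chars.findFrom_natCast_eq_neg_one_iff teks.toList kata.toList k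
          (by omega)).mp hj (pv_prefix_drop_infix hmem.1 hpre)
      simp [pvLoopA, PySem.Str.findFrom_eq, hj, hocc]
    · obtain ⟨hkj, hpref, hmin⟩ :=
        PySem.Chars.findFrom_natCast_spec teks.toList kata.toList k (by omega) hj
      set j := PySem.Chars.findFrom teks.toList kata.toList (k : Int) none with hjdef
      have hj0 : 0 ≤ j := le_trans (Int.natCast_nonneg k) hkj
      have hJlt : j.toNat < teks.toList.length := by
        by_contra hge
        have hnil : teks.toList.drop j.toNat = [] := List.drop_eq_nil_of_le (by omega)
        rw [hnil] at hpref
        exact hp (List.prefix_nil.mp hpref)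
      have hsplit := pvOcc_split teks.toList kata.toList k j.toNat (by omega) hJlt hpref
        (fun i h1 h2 => hmin i h1 h2)
      have hstep : pvLoopA teks kata (f + 1) (PySem.Str.findFrom teks kata (k : Int) none) hasil
          = pvLoopA teks kata f (PySem.Str.findFrom teks kata (j + 1) none) (hasil ++ [kata]) := by
        simp [pvLoopA, PySem.Str.findFrom_eq, ← hjdef, hj]
      rw [hstep, show j + 1 = ((j.toNat + 1 : Nat) : Int) by omega,
          ih (j.toNat + 1) (hasil ++ [kata]) (by omega) (by omega), hsplit]
      simp [List.replicate_succ]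

lemma pvKeyCount_eq (teks kata : String) (hp : kata.toList ≠ []) :
    pvKeyCount teks kata = pvOcc teks.toList kata.toList 0 := by
  unfold pvKeyCount pvOcc
  have hLt : teks.toList.length = teks.length := teks.length_toList
  have hPt : kata.toList.length = kata.length := kata.length_toList
  have hP1 : 1 ≤ kata.length := by
    have := List.length_pos_iff.mpr hp
    omega
  rw [PySem.List.pyRange_one, List.countP_map]
  simp only [Int.sub_zero]
  have hpred : ∀ k : Nat,
      (PySem.Str.slice teks (some (k : Int)) (some ((k : Int) + (kata.length : Int))) == kata)
        = decide (kata.toList <+: teks.toList.drop k) := by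
    intro k
    have hsl : (PySem.Str.slice teks (some (k : Int)) (some ((k : Int) + (kata.length : Int)))).toList
        = (teks.toList.drop k).take kata.length := by
      simp [PySem.Str.toList_slice, PySem.List.slice_natCast_add]
    rw [Bool.eq_iff_iff]
    simp only [beq_iff_eq, decide_eq_true_eq]
    constructor
    · intro h
      have := congrArg String.toList h
      rw [hsl] at this
      exact this ▸ List.take_prefix _ _
    · intro h
      apply String.toList_inj.mp
      rw [hsl, ← hPt]
      exact (List.prefix_iff_eq_take.mp h).symm
  rw [List.countP_congr
    (q := fun k : Nat => decide (kata.toList <+: teks.toList.drop k))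
    (fun a _ => by
      simp only [Function.comp_apply, zero_add]
      rw [hpred a])]
  have hzero : ∀ i, teks.length - kata.length + 1 ≤ i →
      decide (kata.toList <+: teks.toList.drop i) = false := by
    intro i hi
    simp only [decide_eq_false_iff_not]
    intro h
    have hlen := h.length_le
    rw [List.length_drop, hLt, hPt] at hlen
    omega
  by_cases hPL : kata.length ≤ teks.length
  · have hN : ((teks.length : Int) - (kata.length : Int) + 1).toNat
        = teks.length - kata.length + 1 := by omega
    rw [hN]
    simp only [Nat.sub_zero, hLt, ← List.range_eq_range']
    exact (pv_countP_range_ext _ teks.length (teks.length - kata.length + 1) (by omega)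
      hzero).symm
  · have hN : ((teks.length : Int) - (kata.length : Int) + 1).toNat = 0 := by omega
    rw [hN]
    simp only [Nat.sub_zero, hLt, ← List.range_eq_range', List.range_zero, List.countP_nil]
    refine ((pv_countP_range_ext _ teks.length 0 (by omega) ?_).trans (by simp)).symm
    intro i _
    simp only [decide_eq_false_iff_not]
    intro h
    have hlen := h.length_le
    rw [List.length_drop, hLt, hPt] at hlen
    omega

lemma pv_keyword (teks kata : String) (hp : kata.toList ≠ []) (hasil : List String) :
    pvLoopA teks kata (teks.length + 1) (PySem.Str.find teks kata) hasil
      = hasil ++ List.replicate (pvKeyCount teks kata) kata := by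
  rw [pvKeyCount_eq teks kata hp]
  have h0 : PySem.Str.find teks kata = PySem.Str.findFrom teks kata ((0 : Nat) : Int) none := by
    simp
  rw [h0]
  apply pvLoopA_spec teks kata hp (teks.length + 1) 0 hasil (Nat.zero_le _)
  have hle : pvOcc teks.toList kata.toList 0 ≤ teks.toList.length - 0 := by
    unfold pvOcc
    exact le_trans List.countP_le_length (by simp)
  have hLt : teks.toList.length = teks.length := teks.length_toList
  omega

-- ===== VERDICT (by name: the statement is the Claim_ definition above) =====
theorem cari_kata_spec : Claim_equal_cari_kata := by
  intro teks _
  unfold Spec_cari_kata cari_kata cari_kata_alt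
  simp only [List.foldl]
  rw [pv_keyword teks "sang gajah" (by decide), pv_keyword teks "serigala" (by decide),
      pv_keyword teks "harimau" (by decide)]
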